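-- pv_equiv track=rewrite | github.com/Wag2323/ThinkPython | wordplay.py | abecedarian_list
-- ===== SOURCE A (Python) =====
-- def is_abecedarian(word):
--     """returns True if letters in a word are in alphabetical order"""
--     lower = word.lower()
--     for i in range(0,len(lower)-1):
--         if lower[i] > lower[i+1]:
--             return False
--     return True
--
-- def abecedarian_list(object):
--     """gives a list of words that are abecedarian"""
--     list = []
--     for line in object:
--         word = line.strip()
--         if is_abecedarian(word):
--             list.append(word)
--
--     count = len(list)
--     return (list, count)
-- ===== SOURCE B (Python) =====
-- def abecedarian_list(object):
--     def ok(word):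
--         lower = word.lower()
--         return lower == ''.join(sorted(lower))
--     words = [w for w in (line.strip() for line in object) if ok(w)]
--     return (words, len(words))
-- ===== Notes on version B (the rewrite author's own statement) =====
-- stated objective: idiomatic
-- what changed: The abecedarian predicate compares the lowered word with its sorted copy instead of scanning adjacent index pairs, and the wrapper is a single filtering comprehension over the stripped lines instead of an accumulator loop.
import Mathlib
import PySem

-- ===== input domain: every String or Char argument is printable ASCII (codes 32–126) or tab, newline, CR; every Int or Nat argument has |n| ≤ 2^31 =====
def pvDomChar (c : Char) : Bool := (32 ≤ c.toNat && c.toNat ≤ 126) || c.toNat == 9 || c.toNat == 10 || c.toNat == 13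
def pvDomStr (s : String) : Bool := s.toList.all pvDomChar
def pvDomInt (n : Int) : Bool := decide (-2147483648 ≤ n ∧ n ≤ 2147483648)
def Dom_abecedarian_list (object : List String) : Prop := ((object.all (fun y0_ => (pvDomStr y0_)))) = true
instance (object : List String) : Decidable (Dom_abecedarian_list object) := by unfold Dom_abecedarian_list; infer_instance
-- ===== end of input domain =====

-- B replaces A's pairwise adjacent index scan with a sort-and-compare predicate and a filtering comprehension (same asymptotics up to the sort; objective: idiomatic).

-- ===== PORT A =====
-- is_abecedarian: lower the word, scan i in range(0, len-1), early-return False if lower[i] > lower[i+1]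
def isAbecedarianA (word : String) : Bool :=
  let lower := (PySem.Str.lower word).toList
  (PySem.List.pyRange 0 ((lower.length : Int) - 1) 1).all
    (fun i => !(decide (PySem.List.pyGetD lower (i + 1) ' ' < PySem.List.pyGetD lower i ' ')))

def abecedarian_list (object : List String) : List String × Int :=
  let list := object.foldl
    (fun acc line =>
      let word := PySem.Str.strip line
      if isAbecedarianA word then acc ++ [word] else acc) []
  (list, (list.length : Int))

-- ===== PORT B =====
-- ok: lower == ''.join(sorted(lower))  (string equality ported as equality of the char lists)
def isAbecedarianB (word : String) : Bool :=
  let lower := (PySem.Str.lower word).toList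
  lower == PySem.List.sorted lower (fun x => x) false

def abecedarian_list_alt (object : List String) : List String × Int :=
  let words := (object.map PySem.Str.strip).filter isAbecedarianB
  (words, (words.length : Int))

-- ===== PRECONDITION & SPEC =====
def Spec_abecedarian_list (object : List String) (out : List String × Int) : Prop := out = abecedarian_list_alt object
instance (object : List String) (out : List String × Int) : Decidable (Spec_abecedarian_list object out) := by unfold Spec_abecedarian_list; infer_instance

-- ===== CLAIM (what is proved, stated in full; the proofs are below) =====
def Claim_equal_abecedarian_list : Prop := ∀ (object : List String), Dom_abecedarian_list object → Spec_abecedarian_list object (abecedarian_list object)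

-- ===== LEMMAS AND PROOFS =====

-- A's index scan decides "adjacent chars are nondecreasing"
theorem scanA_iff (l : List Char) :
    ((PySem.List.pyRange 0 ((l.length : Int) - 1) 1).all
      (fun i => !(decide (PySem.List.pyGetD l (i + 1) ' ' < PySem.List.pyGetD l i ' '))) = true)
      ↔ l.IsChain (· ≤ ·) := by
  simp only [List.all_eq_true, PySem.List.mem_pyRange_one,
    List.isChain_iff_getElem, Bool.not_eq_eq_eq_not, Bool.not_true, decide_eq_false_iff_not]
  constructor
  · intro h i hi
    have h0 : (0 : Int) ≤ (i : Int) := by positivity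
    have h1 : (i : Int) < (l.length : Int) - 1 := by omega
    have := h (i : Int) ⟨h0, h1⟩
    rw [PySem.List.pyGetD_eq_getElem l ' ' (by omega) (by omega),
        PySem.List.pyGetD_eq_getElem l ' ' (by omega) (by omega)] at this
    have e1 : ((i : Int) + 1).toNat = i + 1 := by omega
    have e2 : ((i : Int)).toNat = i := by omega
    simp only [e1, e2] at this
    exact le_of_not_gt this
  · intro h i hb
    obtain ⟨h0, h1⟩ := hb
    rw [PySem.List.pyGetD_eq_getElem l ' ' (by omega) (by omega),
        PySem.List.pyGetD_eq_getElem l ' ' (by omega) (by omega)]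
    have e1 : (i + 1).toNat = i.toNat + 1 := by omega
    simp only [e1]
    exact not_lt_of_ge (h i.toNat (by omega))

-- B's sort-and-compare decides the same proposition
theorem sortB_iff (l : List Char) :
    ((l == PySem.List.sorted l (fun x => x) false) = true) ↔ l.IsChain (· ≤ ·) := by
  rw [beq_iff_eq]
  constructor
  · intro he
    rw [List.isChain_iff_pairwise]
    have := PySem.List.sorted_pairwise l (fun x => x) (κ := Char)
    rw [← he] at this
    exact this.imp (fun h => h)
  · intro h
    exact (PySem.List.sorted_eq_self_of_pairwise l (fun x => x)
      (((List.isChain_iff_pairwise).mp h).imp (fun h => h))).symm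

theorem pred_eq (w : String) : isAbecedarianA w = isAbecedarianB w := by
  unfold isAbecedarianA isAbecedarianB
  rw [Bool.eq_iff_iff, scanA_iff, sortB_iff]

theorem foldl_eq_filter (p : String → Bool) (object : List String) (acc : List String) :
    object.foldl (fun acc line =>
      let word := PySem.Str.strip line
      if p word then acc ++ [word] else acc) acc
    = acc ++ (object.map PySem.Str.strip).filter p := by
  induction object generalizing acc with
  | nil => simp
  | cons x xs ih =>
    simp only [List.foldl_cons, List.map_cons, List.filter_cons]
    by_cases h : p (PySem.Str.strip x) <;> simp [h, ih]

-- ===== VERDICT (by name: the statement is the Claim_ definition above) =====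
theorem abecedarian_list_spec : Claim_equal_abecedarian_list := by
  intro object _
  unfold Spec_abecedarian_list abecedarian_list abecedarian_list_alt
  rw [foldl_eq_filter isAbecedarianA object [], funext pred_eq]
  simp
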